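-- pv_equiv track=rewrite | github.com/coffeebearchen/video_agent2 | modules/video_engine.py | build_highlight_char_mask
-- ===== SOURCE A (Python) =====
-- from typing import Any, Dict, List, Optional
--
-- def build_highlight_char_mask(text: str, keywords: List[str]) -> List[bool]:
--     mask = [False] * len(text)
--     for keyword in sorted(keywords, key=len, reverse=True):
--         start_index = 0
--         while True:
--             match_index = text.find(keyword, start_index)
--             if match_index < 0:
--                 break
--             for index in range(match_index, min(len(text), match_index + len(keyword))):
--                 mask[index] = True
--             start_index = match_index + len(keyword)
--     return mask
-- ===== SOURCE B (Python) =====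
-- def build_highlight_char_mask(text, keywords):
--     # Staged pipeline: (1) per keyword, list ALL occurrence positions by slice
--     # comparison, then select the greedy non-overlapping ones from that list;
--     # (2) turn the selected intervals into +1/-1 events in a difference array;
--     # (3) one prefix-sum pass builds the mask (covered <=> running count > 0).
--     n = len(text)
--     intervals = []
--     for k in keywords:
--         m = len(k)
--         if m == 0:
--             continue
--         c = k[0]
--         last_end = 0
--         for i in [i for i in range(n - m + 1) if text[i] == c and text[i:i + m] == k]:
--             if i >= last_end:
--                 intervals.append((i, i + m))
--                 last_end = i + m
--     diff = [0] * (n + 1)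
--     for s, e in intervals:
--         diff[s] += 1
--         diff[e] -= 1
--     mask = []
--     run = 0
--     for d in diff[:n]:
--         run += d
--         mask.append(run > 0)
--     return mask
-- ===== Notes on version B (the rewrite author's own statement) =====
-- stated objective: alternative
-- what changed: B is a staged pipeline instead of A's per-keyword find-and-jump scan with in-place mask mutation: it first lists all occurrence positions of each keyword by slice comparison, selects the greedy non-overlapping ones from that list into a global interval list, converts the intervals to +1/-1 events in a difference array, and builds the mask in one prefix-sum pass.
import Mathlib
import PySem

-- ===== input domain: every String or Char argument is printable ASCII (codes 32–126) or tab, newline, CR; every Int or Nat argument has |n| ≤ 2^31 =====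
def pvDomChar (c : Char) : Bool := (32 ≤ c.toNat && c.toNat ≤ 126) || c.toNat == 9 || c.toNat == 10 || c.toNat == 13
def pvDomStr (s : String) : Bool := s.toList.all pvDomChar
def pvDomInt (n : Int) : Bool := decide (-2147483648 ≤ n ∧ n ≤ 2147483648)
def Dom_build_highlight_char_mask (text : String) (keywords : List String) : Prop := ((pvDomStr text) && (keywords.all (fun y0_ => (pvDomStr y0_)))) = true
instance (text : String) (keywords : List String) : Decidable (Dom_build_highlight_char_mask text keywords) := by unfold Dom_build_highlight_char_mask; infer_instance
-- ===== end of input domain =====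

-- B replaces A's per-keyword find-and-jump scan with in-place mask mutation by a staged
-- pipeline: all occurrence positions per keyword (slice comparison), greedy non-overlapping
-- selection from that list into intervals, a ±1 difference array, and one prefix-sum pass
-- building the mask (objective: alternative; not claimed faster).

-- ===== PORT A =====
-- inner 'for index in range(match_index, min(len(text), match_index+len(keyword))): mask[index] = True'
def markLoopA (len : Int) (mask : List Bool) (mi m : Int) : List Bool :=
  (PySem.List.pyRange mi (min len (mi + m)) 1).foldl (fun ms idx => PySem.List.pySetD ms idx true) mask

-- the 'while True: match_index = text.find(keyword, start_index) …' loop; fuel only makes it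
-- total (under Pre_ the keyword is nonempty, so the real loop takes ≤ len(text)+1 iterations).
def findLoopA (text : String) (keyword : String) (fuel : Nat) (mask : List Bool) (start : Int) : List Bool :=
  match fuel with
  | 0 => mask
  | fuel + 1 =>
    let mi := PySem.Str.findFrom text keyword start
    if mi < 0 then mask
    else findLoopA text keyword fuel
          (markLoopA (PySem.Str.len text) mask mi (PySem.Str.len keyword))
          (mi + PySem.Str.len keyword)

def build_highlight_char_mask (text : String) (keywords : List String) : List Bool :=
  (PySem.List.sorted keywords (fun kw => PySem.Str.len kw) true).foldl
    (fun mask keyword => findLoopA text keyword (text.toList.length + 1) mask 0)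
    (List.replicate text.toList.length false)

-- ===== PORT B =====
-- 'text[i] == c and text[i:i+m] == k' of Source B (first-char guard then Python slice compare,
-- exact via PySem.List.pyGet?/slice on code points; i is always in range here, so the
-- Option compare of pyGet? equals Python's char compare)
def matchesAt (t : List Char) (kw : List Char) (i : Int) : Bool :=
  (PySem.List.pyGet? t i == kw[0]?) && (PySem.List.slice t (some i) (some (i + (kw.length : Int))) == kw)

-- '[i for i in range(n - m + 1) if text[i] == c and text[i:i+m] == k]'
def occB (t : List Char) (kw : List Char) : List Int :=
  (PySem.List.pyRange 0 ((t.length : Int) - (kw.length : Int) + 1) 1).filter (fun i => matchesAt t kw i)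

-- body of 'for i in …: if i >= last_end: intervals.append((i, i+m)); last_end = i+m'
def selStep (m : Int) (st : List (Int × Int) × Int) (i : Int) : List (Int × Int) × Int :=
  if st.2 ≤ i then (st.1 ++ [(i, i + m)], i + m) else st

-- the outer 'for k in keywords' loop collecting the greedy intervals of every keyword
def intervalsB (t : List Char) (keywords : List String) : List (Int × Int) :=
  keywords.foldl (fun ivs kw =>
    match kw.toList with
    | [] => ivs                      -- 'if m == 0: continue'
    | c :: ks => ((occB t (c :: ks)).foldl (selStep ((ks.length + 1 : Nat) : Int)) (ivs, 0)).1) []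

-- 'diff = [0]*(n+1); for s, e in intervals: diff[s] += 1; diff[e] -= 1'
def diffB (n : Nat) (ivs : List (Int × Int)) : List Int :=
  ivs.foldl (fun d sv =>
    let d1 := PySem.List.pySetD d sv.1 (PySem.List.pyGetD d sv.1 0 + 1)
    PySem.List.pySetD d1 sv.2 (PySem.List.pyGetD d1 sv.2 0 - 1)) (List.replicate (n + 1) 0)

-- 'run = 0; for d in diff[:n]: run += d; mask.append(run > 0)'
def build_highlight_char_mask_alt (text : String) (keywords : List String) : List Bool :=
  let t := text.toList
  let diff := diffB t.length (intervalsB t keywords)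
  ((PySem.List.slice diff none (some (t.length : Int))).foldl
    (fun (p : Int × List Bool) d => (p.1 + d, p.2 ++ [decide (0 < p.1 + d)])) ((0 : Int), ([] : List Bool))).2

-- ===== PRECONDITION & SPEC =====
-- Pre_ excludes an empty-string keyword: there A's while-loop never terminates (text.find('', s)
-- returns s and start_index does not advance), so A returns on exactly the inputs Pre_ admits.
def Pre_build_highlight_char_mask (_text : String) (keywords : List String) : Prop :=
  "" ∉ keywords
instance (text : String) (keywords : List String) : Decidable (Pre_build_highlight_char_mask text keywords) := by unfold Pre_build_highlight_char_mask; infer_instance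

def pvWitness_build_highlight_char_mask : String × List String := ("abcab c", ["ab", "c", "zz"])

def Spec_build_highlight_char_mask (text : String) (keywords : List String) (out : List Bool) : Prop := out = build_highlight_char_mask_alt text keywords
instance (text : String) (keywords : List String) (out : List Bool) : Decidable (Spec_build_highlight_char_mask text keywords out) := by unfold Spec_build_highlight_char_mask; infer_instance

-- ===== CLAIM (what is proved, stated in full; the proofs are below) =====
def Claim_equal_build_highlight_char_mask : Prop := ∀ (text : String) (keywords : List String), Dom_build_highlight_char_mask text keywords → Pre_build_highlight_char_mask text keywords → Spec_build_highlight_char_mask text keywords (build_highlight_char_mask text keywords)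

-- ===== LEMMAS AND PROOFS =====

-- the common specification: position j of t is covered by the greedy non-overlapping
-- occurrences of the nonempty keyword c :: ks when scanning from position i
def coveredAt (t : List Char) (c : Char) (ks : List Char) (i j : Nat) : Bool :=
  if i + (ks.length + 1) ≤ t.length then
    if (c :: ks) <+: t.drop i then
      (decide (i ≤ j) && decide (j < i + (ks.length + 1))) || coveredAt t c ks (i + (ks.length + 1)) j
    else coveredAt t c ks (i + 1) j
  else false
termination_by t.length - i
decreasing_by all_goals omega

def coveredKW (t : List Char) (kw : String) (j : Nat) : Bool :=
  match kw.toList with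
  | [] => false
  | c :: ks => coveredAt t c ks 0 j

-- ---- A side ----

lemma length_markFold (l : List Int) (mask : List Bool) :
    (l.foldl (fun ms idx => PySem.List.pySetD ms idx true) mask).length = mask.length := by
  induction l generalizing mask with
  | nil => rfl
  | cons a l ih => simp [List.foldl, ih, PySem.List.length_pySetD]

lemma markFold_getElem? (a b : Nat) (mask : List Bool) (j : Nat) (hb : b ≤ mask.length) :
    ((PySem.List.pyRange (a : Int) (b : Int) 1).foldl (fun ms idx => PySem.List.pySetD ms idx true) mask)[j]? =
      if a ≤ j ∧ j < b then some true else mask[j]? := by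
  by_cases h : b ≤ a
  · rw [PySem.List.pyRange_one_eq_nil (by exact_mod_cast h)]
    simp; omega
  · have hab : (a : Int) < (b : Int) := by exact_mod_cast Nat.lt_of_not_le h
    rw [PySem.List.pyRange_one_cons hab]
    simp only [List.foldl_cons]
    have hcast : ((a : Int) + 1) = ((a + 1 : Nat) : Int) := by push_cast; ring
    rw [hcast, markFold_getElem? (a+1) b _ j (by rwa [PySem.List.length_pySetD])]
    rw [PySem.List.pySetD_natCast]
    rw [List.getElem?_set]
    split_ifs with h1 h2 h3 h4 h5 <;> try rfl
    all_goals omega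
termination_by b - a

lemma length_findLoopA (text keyword : String) (fuel : Nat) (mask : List Bool) (s : Int) :
    (findLoopA text keyword fuel mask s).length = mask.length := by
  induction fuel generalizing mask s with
  | zero => rfl
  | succ fuel ih =>
    rw [findLoopA]
    split
    · rfl
    · rw [ih]
      simp [markLoopA, length_markFold]

lemma infix_of_drop_succ (t : List Char) (k : List Char) (i : Nat)
    (h : k <:+: t.drop (i + 1)) : k <:+: t.drop i := by
  refine h.trans (List.IsSuffix.isInfix ?_)
  have h1 : (t.drop i).drop 1 = t.drop (i + 1) := by rw [List.drop_drop]
  rw [← h1]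
  exact List.drop_suffix 1 (t.drop i)

lemma coveredAt_false_of_not_infix (t : List Char) (c : Char) (ks : List Char) (i j : Nat)
    (h : ¬ (c :: ks) <:+: t.drop i) : coveredAt t c ks i j = false := by
  fun_induction coveredAt t c ks i j with
  | case1 i hle hp ih => exact absurd hp.isInfix h
  | case2 i hle hp ih => exact ih (fun hi => h (infix_of_drop_succ _ _ _ hi))
  | case3 i hle => rfl

lemma coveredAt_shift (t : List Char) (c : Char) (ks : List Char) (i f j : Nat)
    (hif : i ≤ f) (hf : (c :: ks) <+: t.drop f)
    (hmin : ∀ l, i ≤ l → l < f → ¬ (c :: ks) <+: t.drop l) :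
    coveredAt t c ks i j = coveredAt t c ks f j := by
  have hflen : f + (ks.length + 1) ≤ t.length := by
    have := hf.length_le
    simp at this
    omega
  rcases Nat.eq_or_lt_of_le hif with rfl | hlt
  · rfl
  · rw [coveredAt, if_pos (by omega), if_neg (hmin i le_rfl hlt)]
    exact coveredAt_shift t c ks (i+1) f j (by omega) hf (fun l h1 h2 => hmin l (by omega) h2)
termination_by f - i

lemma findLoopA_getElem? (text keyword : String) (c : Char) (ks : List Char)
    (hk : keyword.toList = c :: ks) (fuel i : Nat) (mask : List Bool)
    (hi : i ≤ text.toList.length) (hm : mask.length = text.toList.length)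
    (hfuel : text.toList.length - i < fuel) (j : Nat) :
    (findLoopA text keyword fuel mask (i : Int))[j]? =
      if coveredAt text.toList c ks i j then some true else mask[j]? := by
  induction fuel generalizing i mask with
  | zero => omega
  | succ fuel ih =>
    rw [findLoopA]
    have hfind : PySem.Str.findFrom text keyword (i : Int) =
        PySem.Chars.findFrom text.toList (c :: ks) (i : Int) := by
      rw [← hk]; simp
    by_cases hneg : PySem.Chars.findFrom text.toList (c :: ks) (i : Int) = -1
    · rw [if_pos (by simp only [hfind, hneg]; decide)]
      rw [coveredAt_false_of_not_infix _ _ _ _ j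
        ((PySem.Chars.findFrom_natCast_eq_neg_one_iff text.toList (c :: ks) i hi).mp hneg)]
      rfl
    · obtain ⟨hif, hpre, hmin⟩ := PySem.Chars.findFrom_natCast_spec text.toList (c :: ks) i hi hneg
      set f := PySem.Chars.findFrom text.toList (c :: ks) (i : Int) with hfdef
      have hf0 : 0 ≤ f := le_trans (by exact_mod_cast Int.natCast_nonneg i) hif
      have hfn : f = ((f.toNat : Nat) : Int) := (Int.toNat_of_nonneg hf0).symm
      have hfnm : f.toNat + (ks.length + 1) ≤ text.toList.length := by
        have h2 := hpre.length_le
        rw [List.length_drop] at h2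
        simp only [List.length_cons] at h2
        omega
      rw [if_neg (by simp only [hfind]; omega)]
      have hlen : PySem.Str.len text = ((text.toList.length : Nat) : Int) := by simp
      have hklen : PySem.Str.len keyword = ((ks.length + 1 : Nat) : Int) := by
        simp [hk]
      have hmark : markLoopA (PySem.Str.len text) mask f (PySem.Str.len keyword) =
          (PySem.List.pyRange ((f.toNat : Nat) : Int) ((f.toNat + (ks.length + 1) : Nat) : Int) 1).foldl
            (fun ms idx => PySem.List.pySetD ms idx true) mask := by
        rw [markLoopA, hlen, hklen, hfn]
        have hminr : min ((text.toList.length : Nat) : Int)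
            (((f.toNat : Nat) : Int) + ((ks.length + 1 : Nat) : Int)) =
            ((f.toNat + (ks.length + 1) : Nat) : Int) := by push_cast; omega
        rw [hminr]
        simp
      rw [hfind, hmark]
      have hstep : f + PySem.Str.len keyword = ((f.toNat + (ks.length + 1) : Nat) : Int) := by
        rw [hklen, hfn]; push_cast; omega
      rw [hstep, ih (f.toNat + (ks.length + 1)) _ hfnm
        (by rw [length_markFold]; exact hm) (by omega) ]
      rw [markFold_getElem? _ _ _ _ (by omega : f.toNat + (ks.length + 1) ≤ mask.length)]
      rw [coveredAt_shift text.toList c ks i f.toNat j (by omega) hpre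
        (fun l h1 h2 => hmin l h1 h2)]
      conv_rhs => rw [coveredAt]
      rw [if_pos hfnm, if_pos hpre]
      rcases hc : coveredAt text.toList c ks (f.toNat + (ks.length + 1)) j with _ | _ <;> simp

lemma foldA_getElem? (text : String) (ks' : List String) (mask : List Bool)
    (hne : ∀ kw ∈ ks', kw ≠ "") (hm : mask.length = text.toList.length) (j : Nat) :
    (ks'.foldl (fun mask keyword => findLoopA text keyword (text.toList.length + 1) mask 0) mask)[j]? =
      if ks'.any (fun kw => coveredKW text.toList kw j) then some true else mask[j]? := by
  induction ks' generalizing mask with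
  | nil => simp
  | cons kw rest ih =>
    simp only [List.foldl_cons, List.any_cons]
    obtain ⟨c, ks, hk⟩ : ∃ c ks, kw.toList = c :: ks := by
      cases h : kw.toList with
      | nil => exact absurd (String.toList_eq_nil_iff.mp h) (hne kw (by simp))
      | cons c ks => exact ⟨c, ks, rfl⟩
    rw [ih _ (fun k hmem => hne k (List.mem_cons_of_mem _ hmem))
      (by rw [length_findLoopA]; exact hm)]
    rw [show (0 : Int) = ((0 : Nat) : Int) from rfl,
      findLoopA_getElem? text kw c ks hk _ 0 mask (by omega) hm (by omega) j]
    rcases hc : coveredAt text.toList c ks 0 j with _ | _ <;>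
      simp [coveredKW, hk, hc]

lemma coveredAt_lt_length (t : List Char) (c : Char) (ks : List Char) (i j : Nat) :
    coveredAt t c ks i j = true → j < t.length := by
  fun_induction coveredAt t c ks i j with
  | case1 i hle hp ih =>
    intro h
    simp only [Bool.or_eq_true, Bool.and_eq_true, decide_eq_true_eq] at h
    rcases h with h | h
    · omega
    · exact ih h
  | case2 i hle hp ih => exact ih
  | case3 i hle => intro h; simp at h

-- ---- B side ----

-- membership in the occurrence list: exactly the in-range prefix-match positions
lemma mem_occB (t : List Char) (c : Char) (ks : List Char) (p : Int) :
    p ∈ occB t (c :: ks) ↔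
      0 ≤ p ∧ p.toNat + (ks.length + 1) ≤ t.length ∧ (c :: ks) <+: t.drop p.toNat := by
  rw [occB, List.mem_filter, PySem.List.mem_pyRange_one]
  simp only [List.length_cons]
  constructor
  · rintro ⟨⟨h0, hlt⟩, hm⟩
    have hpn : p = ((p.toNat : Nat) : Int) := (Int.toNat_of_nonneg h0).symm
    have hrange : p.toNat + (ks.length + 1) ≤ t.length := by omega
    refine ⟨h0, hrange, ?_⟩
    rw [matchesAt, Bool.and_eq_true] at hm
    replace hm := hm.2
    rw [List.length_cons] at hm
    rw [hpn] at hm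
    rw [show ((p.toNat : Nat) : Int) + ((ks.length + 1 : Nat) : Int) =
        ((p.toNat : Nat) : Int) + ((ks.length + 1 : Nat) : Int) from rfl] at hm
    rw [PySem.List.slice_natCast_add] at hm
    have heq : (t.drop p.toNat).take (ks.length + 1) = c :: ks := by
      simpa using hm
    rw [List.prefix_iff_eq_take]
    simp [heq]
  · rintro ⟨h0, hrange, hpre⟩
    have hpn : p = ((p.toNat : Nat) : Int) := (Int.toNat_of_nonneg h0).symm
    refine ⟨⟨h0, by omega⟩, ?_⟩
    rw [matchesAt, Bool.and_eq_true]
    constructor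
    · obtain ⟨r, hr⟩ := hpre
      have hdrop : (t.drop p.toNat)[0]? = some c := by
        rw [← hr]; rfl
      rw [List.getElem?_drop, Nat.add_zero] at hdrop
      rw [hpn, PySem.List.pyGet?_natCast, hdrop]
      simp
    · rw [List.length_cons, hpn, PySem.List.slice_natCast_add]
      have heq : c :: ks = (t.drop p.toNat).take (ks.length + 1) := by
        have := List.prefix_iff_eq_take.mp hpre
        simpa using this
      simp [← heq]

lemma sorted_occB (t : List Char) (kw : List Char) : (occB t kw).Pairwise (· < ·) :=
  (PySem.List.pairwise_lt_pyRange_one _ _).filter _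

-- accumulator factorization of the greedy selection fold
lemma sel_acc (occ : List Int) (m : Int) (acc : List (Int × Int)) (e : Int) :
    (occ.foldl (selStep m) (acc, e)).1 = acc ++ (occ.foldl (selStep m) ([], e)).1 := by
  induction occ generalizing acc e with
  | nil => simp
  | cons p rest ih =>
    simp only [List.foldl_cons, selStep]
    by_cases h : e ≤ p
    · rw [if_pos h, if_pos h]
      simp only [List.nil_append]
      rw [ih (acc ++ [(p, p + m)]), ih [(p, p + m)]]
      simp
    · rw [if_neg h, if_neg h]
      exact ih acc e

-- every selected interval is (p, p+m) for some occurrence p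
lemma sel_shape (occ : List Int) (m : Int) (e : Int) (iv : Int × Int)
    (h : iv ∈ (occ.foldl (selStep m) ([], e)).1) : ∃ p ∈ occ, iv = (p, p + m) := by
  induction occ generalizing e with
  | nil => simp at h
  | cons p rest ih =>
    simp only [List.foldl_cons, selStep] at h
    by_cases hpe : e ≤ p
    · rw [if_pos hpe] at h
      rw [sel_acc] at h
      rcases List.mem_append.mp h with h | h
      · exact ⟨p, by simp, by simpa using h⟩
      · obtain ⟨q, hq, hiv⟩ := ih _ h
        exact ⟨q, by simp [hq], hiv⟩
    · rw [if_neg hpe] at h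
      obtain ⟨q, hq, hiv⟩ := ih _ h
      exact ⟨q, by simp [hq], hiv⟩

-- greedy selection over a sorted, complete occurrence list realizes coveredAt
lemma sel_covers (t : List Char) (c : Char) (ks : List Char) (occ : List Int) (e j : Nat)
    (hsort : occ.Pairwise (· < ·))
    (hmem : ∀ p ∈ occ, 0 ≤ p ∧ p.toNat + (ks.length + 1) ≤ t.length ∧ (c :: ks) <+: t.drop p.toNat)
    (hcomp : ∀ q : Nat, e ≤ q → q + (ks.length + 1) ≤ t.length → (c :: ks) <+: t.drop q →
      ((q : Nat) : Int) ∈ occ) :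
    (∃ iv ∈ (occ.foldl (selStep ((ks.length + 1 : Nat) : Int)) ([], ((e : Nat) : Int))).1,
        iv.1 ≤ (j : Int) ∧ (j : Int) < iv.2) ↔ coveredAt t c ks e j = true := by
  induction occ generalizing e with
  | nil =>
    simp only [List.foldl_nil, List.not_mem_nil, false_and, exists_false, false_iff]
    intro hcov
    -- no occurrence at any position ≥ e, hence coveredAt e j = false
    suffices hng : ¬ (c :: ks) <:+: t.drop e by
      rw [coveredAt_false_of_not_infix t c ks e j hng] at hcov
      exact absurd hcov (by simp)
    intro hinf
    obtain ⟨l1, l2, hsplit⟩ := hinf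
    have hq : (c :: ks) <+: t.drop (e + l1.length) := by
      have : t.drop (e + l1.length) = (t.drop e).drop l1.length := by
        rw [List.drop_drop]
      rw [this, ← hsplit]
      simp
    have hlen : (e + l1.length) + (ks.length + 1) ≤ t.length := by
      have h1 := hq.length_le
      rw [List.length_drop] at h1
      simp only [List.length_cons] at h1
      omega
    exact absurd (hcomp (e + l1.length) (by omega) hlen hq) (List.not_mem_nil)
  | cons p rest ih =>
    have hrest_sort := (List.pairwise_cons.mp hsort).2
    have hp_lt := (List.pairwise_cons.mp hsort).1
    have hp := hmem p (by simp)
    have hpn : p = ((p.toNat : Nat) : Int) := (Int.toNat_of_nonneg hp.1).symm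
    simp only [List.foldl_cons, selStep]
    by_cases hpe : ((e : Nat) : Int) ≤ p
    · rw [if_pos hpe]
      simp only [List.nil_append]
      rw [sel_acc]
      have hcast : p + ((ks.length + 1 : Nat) : Int) = ((p.toNat + (ks.length + 1) : Nat) : Int) := by
        rw [hpn]; push_cast; omega
      have hshift : coveredAt t c ks e j = coveredAt t c ks p.toNat j := by
        refine coveredAt_shift t c ks e p.toNat j (by omega) hp.2.2 ?_
        intro l hel hlp hprel
        have hlen : l + (ks.length + 1) ≤ t.length := by
          have h1 := hprel.length_le
          rw [List.length_drop] at h1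
          simp only [List.length_cons] at h1
          omega
        have hl := hcomp l hel hlen hprel
        rcases List.mem_cons.mp hl with h | h
        · omega
        · have := hp_lt _ h; omega
      rw [hshift]
      conv_rhs => rw [coveredAt]
      rw [if_pos hp.2.1, if_pos hp.2.2]
      have hihyp := ih (p.toNat + (ks.length + 1)) hrest_sort
        (fun q hq => hmem q (by simp [hq]))
        (fun q hq1 hq2 hq3 => by
          have hql := hcomp q (by omega) hq2 hq3
          rcases List.mem_cons.mp hql with h | h
          · exfalso; omega
          · exact h)
      rw [← hcast] at hihyp
      constructor
      · rintro ⟨iv, hiv, hcov⟩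
        rcases List.mem_append.mp hiv with h | h
        · simp only [List.mem_singleton] at h
          subst h
          simp only [Bool.or_eq_true, Bool.and_eq_true, decide_eq_true_eq]
          left
          constructor <;> [skip; skip] <;> omega
        · simp only [Bool.or_eq_true]
          right
          exact hihyp.mp ⟨iv, h, hcov⟩
      · intro hcov
        simp only [Bool.or_eq_true, Bool.and_eq_true, decide_eq_true_eq] at hcov
        rcases hcov with ⟨h1, h2⟩ | hcov
        · exact ⟨(p, p + ((ks.length + 1 : Nat) : Int)), by simp, by omega, by rw [hcast]; omega⟩
        · obtain ⟨iv, hiv, hc⟩ := hihyp.mpr hcov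
          exact ⟨iv, List.mem_append.mpr (Or.inr hiv), hc⟩
    · rw [if_neg hpe]
      exact ih e hrest_sort (fun q hq => hmem q (by simp [hq]))
        (fun q hq1 hq2 hq3 => by
          have hql := hcomp q hq1 hq2 hq3
          rcases List.mem_cons.mp hql with h | h
          · exfalso; omega
          · exact h)

-- interval coverage of intervalsB = some keyword covers j (and interval bounds)
lemma intervalsB_bounds (t : List Char) (kws : List String) (acc : List (Int × Int))
    (hacc : ∀ iv ∈ acc, 0 ≤ iv.1 ∧ iv.1 < iv.2 ∧ iv.2 ≤ (t.length : Int)) :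
    ∀ iv ∈ kws.foldl (fun ivs kw =>
        match kw.toList with
        | [] => ivs
        | c :: ks => ((occB t (c :: ks)).foldl (selStep ((ks.length + 1 : Nat) : Int)) (ivs, 0)).1) acc,
      0 ≤ iv.1 ∧ iv.1 < iv.2 ∧ iv.2 ≤ (t.length : Int) := by
  induction kws generalizing acc with
  | nil => exact hacc
  | cons kw rest ih =>
    simp only [List.foldl_cons]
    cases h : kw.toList with
    | nil => exact ih acc hacc
    | cons c ks =>
      apply ih
      intro iv hiv
      have hiv' : iv ∈ ((occB t (c :: ks)).foldl (selStep ((ks.length + 1 : Nat) : Int)) (acc, 0)).1 := hiv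
      rw [sel_acc] at hiv'
      rcases List.mem_append.mp hiv' with hiv | hiv
      · exact hacc iv hiv
      · obtain ⟨p, hp, hshape⟩ := sel_shape _ _ _ _ hiv
        obtain ⟨h0, hrange, _⟩ := (mem_occB t c ks p).mp hp
        subst hshape
        refine ⟨h0, by push_cast; omega, ?_⟩
        have hpn : p = ((p.toNat : Nat) : Int) := (Int.toNat_of_nonneg h0).symm
        rw [hpn]; push_cast; omega

lemma intervalsB_covers (t : List Char) (kws : List String) (acc : List (Int × Int)) (j : Nat) :
    (∃ iv ∈ kws.foldl (fun ivs kw =>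
        match kw.toList with
        | [] => ivs
        | c :: ks => ((occB t (c :: ks)).foldl (selStep ((ks.length + 1 : Nat) : Int)) (ivs, 0)).1) acc,
      iv.1 ≤ (j : Int) ∧ (j : Int) < iv.2) ↔
      (∃ iv ∈ acc, iv.1 ≤ (j : Int) ∧ (j : Int) < iv.2) ∨
        kws.any (fun kw => coveredKW t kw j) = true := by
  induction kws generalizing acc with
  | nil => simp
  | cons kw rest ih =>
    simp only [List.foldl_cons, List.any_cons]
    cases h : kw.toList with
    | nil =>
      rw [ih]
      simp [coveredKW, h]
    | cons c ks =>
      rw [ih]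
      have hsel : (∃ iv ∈ ((occB t (c :: ks)).foldl (selStep ((ks.length + 1 : Nat) : Int)) (acc, 0)).1,
          iv.1 ≤ (j : Int) ∧ (j : Int) < iv.2) ↔
          (∃ iv ∈ acc, iv.1 ≤ (j : Int) ∧ (j : Int) < iv.2) ∨ coveredAt t c ks 0 j = true := by
        rw [show (0 : Int) = ((0 : Nat) : Int) from rfl, sel_acc]
        rw [← sel_covers t c ks (occB t (c :: ks)) 0 j (sorted_occB t (c :: ks))
          (fun p hp => (mem_occB t c ks p).mp hp)
          (fun q _ hq2 hq3 => (mem_occB t c ks (q : Int)).mpr ⟨by omega, by simpa using hq2, by simpa using hq3⟩)]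
        constructor
        · rintro ⟨iv, hiv, hc⟩
          rcases List.mem_append.mp hiv with hiv | hiv
          · exact Or.inl ⟨iv, hiv, hc⟩
          · exact Or.inr ⟨iv, hiv, hc⟩
        · rintro (⟨iv, hiv, hc⟩ | ⟨iv, hiv, hc⟩)
          · exact ⟨iv, List.mem_append.mpr (Or.inl hiv), hc⟩
          · exact ⟨iv, List.mem_append.mpr (Or.inr hiv), hc⟩
      rw [hsel]
      simp only [coveredKW, h, Bool.or_eq_true]
      exact or_assoc

-- ---- difference array and prefix sum ----

lemma diffFold_length (ivs : List (Int × Int)) (d : List Int) :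
    (ivs.foldl (fun d sv =>
      let d1 := PySem.List.pySetD d sv.1 (PySem.List.pyGetD d sv.1 0 + 1)
      PySem.List.pySetD d1 sv.2 (PySem.List.pyGetD d1 sv.2 0 - 1)) d).length = d.length := by
  induction ivs generalizing d with
  | nil => rfl
  | cons iv rest ih =>
    simp only [List.foldl_cons]
    rw [ih]
    simp [PySem.List.length_pySetD]

-- effect of one in-range set on a prefix sum
lemma sum_take_set (l : List Int) (i : Nat) (v : Int) (k : Nat) (hi : i < l.length) :
    ((l.set i v).take k).sum = (l.take k).sum + (if i < k then v - l.getD i 0 else 0) := by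
  induction l generalizing i k with
  | nil => simp at hi
  | cons a l ihl =>
    cases i with
    | zero =>
      cases k with
      | zero => simp
      | succ k =>
        simp only [List.set_cons_zero, List.take_succ_cons, List.sum_cons, List.getD_cons_zero]
        rw [if_pos (Nat.succ_pos k)]
        ring
    | succ i =>
      cases k with
      | zero => simp
      | succ k =>
        simp only [List.set_cons_succ, List.take_succ_cons, List.sum_cons, List.getD_cons_succ]
        rw [ihl i k (by simpa using hi)]
        by_cases h : i < k
        · rw [if_pos h, if_pos (by omega)]
          ring
        · rw [if_neg h, if_neg (by omega)]
          ring

lemma diffFold_sum (ivs : List (Int × Int)) (n j : Nat) (d : List Int)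
    (_hj : j < n) (hd : d.length = n + 1)
    (hb : ∀ iv ∈ ivs, 0 ≤ iv.1 ∧ iv.1 < iv.2 ∧ iv.2 ≤ (n : Int)) :
    ((ivs.foldl (fun d sv =>
        let d1 := PySem.List.pySetD d sv.1 (PySem.List.pyGetD d sv.1 0 + 1)
        PySem.List.pySetD d1 sv.2 (PySem.List.pyGetD d1 sv.2 0 - 1)) d).take (j + 1)).sum =
      (d.take (j + 1)).sum +
        ((ivs.countP (fun iv => decide (iv.1 ≤ (j : Int) ∧ (j : Int) < iv.2)) : Nat) : Int) := by
  induction ivs generalizing d with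
  | nil => simp
  | cons iv rest ih =>
    obtain ⟨hb0, hb1, hb2⟩ := hb iv (by simp)
    have hs : iv.1 = ((iv.1.toNat : Nat) : Int) := (Int.toNat_of_nonneg hb0).symm
    have he : iv.2 = ((iv.2.toNat : Nat) : Int) := (Int.toNat_of_nonneg (by omega)).symm
    have hsn : iv.1.toNat < d.length := by omega
    have hen : iv.2.toNat < d.length := by omega
    simp only [List.foldl_cons, List.countP_cons]
    have hset1 : PySem.List.pySetD d iv.1 (PySem.List.pyGetD d iv.1 0 + 1) =
        d.set iv.1.toNat (d.getD iv.1.toNat 0 + 1) := by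
      rw [hs, PySem.List.pySetD_natCast, PySem.List.pyGetD_natCast, Int.toNat_natCast]
    set d1 := d.set iv.1.toNat (d.getD iv.1.toNat 0 + 1) with hd1
    have hd1len : d1.length = n + 1 := by rw [hd1, List.length_set]; exact hd
    have hen1 : iv.2.toNat < d1.length := by omega
    have hset2 : PySem.List.pySetD d1 iv.2 (PySem.List.pyGetD d1 iv.2 0 - 1) =
        d1.set iv.2.toNat (d1.getD iv.2.toNat 0 - 1) := by
      rw [he, PySem.List.pySetD_natCast, PySem.List.pyGetD_natCast, Int.toNat_natCast]
    rw [hset1, hset2]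
    rw [ih _ (by rw [List.length_set, hd1len]) (fun iv h => hb iv (by simp [h]))]
    rw [sum_take_set _ _ _ _ hen1]
    rw [hd1, sum_take_set _ _ _ _ hsn]
    have hcond : decide (iv.1 ≤ (j : Int) ∧ (j : Int) < iv.2) =
        decide (iv.1.toNat ≤ j ∧ j < iv.2.toNat) := by
      rw [decide_eq_decide]
      omega
    rw [hcond]
    by_cases hc : iv.1.toNat ≤ j ∧ j < iv.2.toNat
    · rw [if_pos (by omega : iv.1.toNat < j + 1), if_neg (by omega : ¬ iv.2.toNat < j + 1)]
      simp only [hc, and_self, decide_true]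
      push_cast
      ring
    · simp only [hc, decide_false]
      by_cases h1 : iv.1.toNat < j + 1
      · have h2 : iv.2.toNat < j + 1 := by omega
        rw [if_pos h1, if_pos h2]
        push_cast
        ring
      · rw [if_neg h1, if_neg (by omega)]
        push_cast
        ring

-- the prefix-sum fold produces the running-sum mask
lemma runFold_spec (l : List Int) (r : Int) (acc : List Bool) :
    (l.foldl (fun (p : Int × List Bool) d => (p.1 + d, p.2 ++ [decide (0 < p.1 + d)])) (r, acc)).2 =
      acc ++ (List.range l.length).map (fun j => decide (0 < r + (l.take (j + 1)).sum)) := by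
  induction l generalizing r acc with
  | nil => simp
  | cons d l ih =>
    simp only [List.foldl_cons, List.length_cons]
    rw [ih, List.range_succ_eq_map, List.map_cons, List.map_map, List.append_assoc,
      List.singleton_append]
    congr 2
    · simp
    · apply List.map_congr_left
      intro k _
      simp only [Function.comp_apply, Nat.succ_eq_add_one, List.take_succ_cons, List.sum_cons]
      apply decide_eq_decide.mpr
      constructor <;> intro h <;> linarith

-- characterization of B's output
lemma alt_getElem? (text : String) (keywords : List String) (j : Nat) :
    (build_highlight_char_mask_alt text keywords)[j]? =
      if j < text.toList.length then
        some (keywords.any (fun kw => coveredKW text.toList kw j))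
      else none := by
  have hbnd : ∀ iv ∈ intervalsB text.toList keywords,
      0 ≤ iv.1 ∧ iv.1 < iv.2 ∧ iv.2 ≤ (text.toList.length : Int) :=
    intervalsB_bounds text.toList keywords [] (by simp)
  rw [show build_highlight_char_mask_alt text keywords =
      ((PySem.List.slice (diffB text.toList.length (intervalsB text.toList keywords)) none
        (some ((text.toList.length : Nat) : Int))).foldl
        (fun (p : Int × List Bool) d => (p.1 + d, p.2 ++ [decide (0 < p.1 + d)]))
        ((0 : Int), ([] : List Bool))).2 from rfl]
  rw [PySem.List.slice_to_natCast]
  rw [runFold_spec]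
  simp only [List.nil_append]
  have hdlen : (diffB text.toList.length (intervalsB text.toList keywords)).length =
      text.toList.length + 1 := by
    rw [diffB, diffFold_length, List.length_replicate]
  have hlen : ((diffB text.toList.length (intervalsB text.toList keywords)).take
      text.toList.length).length = text.toList.length := by
    rw [List.length_take]; omega
  rw [hlen, List.getElem?_map]
  by_cases hj : j < text.toList.length
  · rw [List.getElem?_range hj]
    simp only [Option.map_some, if_pos hj]
    congr 1
    have htake : (((diffB text.toList.length (intervalsB text.toList keywords)).take
        text.toList.length).take (j + 1)).sum =
        ((diffB text.toList.length (intervalsB text.toList keywords)).take (j + 1)).sum := by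
      have hmin : min (j + 1) text.toList.length = j + 1 := by omega
      rw [List.take_take, hmin]
    rw [htake]
    rw [diffB, diffFold_sum (intervalsB text.toList keywords) text.toList.length j _ hj
      (by simp) hbnd]
    have hz : ((List.replicate (text.toList.length + 1) (0 : Int)).take (j + 1)).sum = 0 := by
      rw [List.take_replicate]
      simp
    rw [hz, zero_add, zero_add]
    have hcount : (0 < ((intervalsB text.toList keywords).countP
          (fun iv => decide (iv.1 ≤ (j : Int) ∧ (j : Int) < iv.2)) : Int)) ↔
        (∃ iv ∈ intervalsB text.toList keywords, iv.1 ≤ (j : Int) ∧ (j : Int) < iv.2) := by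
      rw [show ((0 : Int) < ((intervalsB text.toList keywords).countP
            (fun iv => decide (iv.1 ≤ (j : Int) ∧ (j : Int) < iv.2)) : Nat)) ↔
          0 < (intervalsB text.toList keywords).countP
            (fun iv => decide (iv.1 ≤ (j : Int) ∧ (j : Int) < iv.2)) from by exact_mod_cast Iff.rfl]
      rw [List.countP_pos_iff]
      simp
    have hcov : (∃ iv ∈ intervalsB text.toList keywords, iv.1 ≤ (j : Int) ∧ (j : Int) < iv.2) ↔
        keywords.any (fun kw => coveredKW text.toList kw j) = true := by
      have h1 := intervalsB_covers text.toList keywords [] j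
      constructor
      · intro hx
        rcases h1.mp hx with hx' | hx'
        · obtain ⟨iv, hiv, _⟩ := hx'
          simp at hiv
        · exact hx'
      · intro hx
        exact h1.mpr (Or.inr hx)
    rw [decide_eq_decide.mpr hcount]
    rcases h : keywords.any (fun kw => coveredKW text.toList kw j) with _ | _
    · apply decide_eq_false
      rw [hcov, h]
      simp
    · exact decide_eq_true (hcov.mpr h)
  · rw [if_neg hj, List.getElem?_eq_none (by simpa using hj)]
    simp

-- ===== VERDICT (by name: the statement is the Claim_ definition above) =====
theorem build_highlight_char_mask_spec : Claim_equal_build_highlight_char_mask := by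
  intro text keywords _ hpre
  unfold Pre_build_highlight_char_mask at hpre
  unfold Spec_build_highlight_char_mask
  apply List.ext_getElem?
  intro j
  rw [build_highlight_char_mask]
  have hne : ∀ kw ∈ PySem.List.sorted keywords (fun kw => PySem.Str.len kw) true, kw ≠ "" := by
    intro kw hmem h
    exact hpre (h ▸ ((PySem.List.mem_sorted _ _ _ _).mp hmem))
  rw [foldA_getElem? text _ _ hne (by simp) j]
  have hany : (PySem.List.sorted keywords (fun kw => PySem.Str.len kw) true).any
      (fun kw => coveredKW text.toList kw j) = keywords.any (fun kw => coveredKW text.toList kw j) := by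
    apply Bool.eq_iff_iff.mpr
    simp only [List.any_eq_true]
    constructor
    · rintro ⟨kw, hmem, hkw⟩
      exact ⟨kw, (PySem.List.mem_sorted _ _ _ _).mp hmem, hkw⟩
    · rintro ⟨kw, hmem, hkw⟩
      exact ⟨kw, (PySem.List.mem_sorted _ _ _ _).mpr hmem, hkw⟩
  rw [hany]
  rw [alt_getElem? text keywords j]
  by_cases hj : j < text.toList.length
  · rw [if_pos hj]
    rcases hA : keywords.any (fun kw => coveredKW text.toList kw j) with _ | _
    · rw [if_neg (by simp : ¬(false = true)), List.getElem?_replicate, if_pos hj]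
    · rfl
  · rw [if_neg hj]
    have hA : keywords.any (fun kw => coveredKW text.toList kw j) = false := by
      rw [List.any_eq_false]
      intro kw hmem hkw
      rcases hcl : kw.toList with _ | ⟨c, ks⟩
      · simp [coveredKW, hcl] at hkw
      · rw [coveredKW, hcl] at hkw
        exact hj (coveredAt_lt_length _ _ _ _ _ hkw)
    rw [hA]
    simp only [Bool.false_eq_true, if_false]
    rw [List.getElem?_replicate, if_neg hj]
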